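-- pv_equiv track=rewrite | github.com/incnone/necrobot | clparse.py | pop_command_from_list
-- ===== SOURCE A (Python) =====
-- def pop_command_from_list(args, cmd_list):
--     arg_indicies_to_pop = []
--     list_to_return = []
--     found_command = False
--     for i, arg in enumerate(args):
--         if arg.startswith('-'): #this is a command
--             if found_command:
--                 break #for
--             else:
--                 command = arg.lstrip('-')
--                 if command in cmd_list:
--                     list_to_return.append(command)
--                     arg_indicies_to_pop.append(i)
--                     found_command = True
--         elif found_command:
--             arg_indicies_to_pop.append(i)
--             list_to_return.append(arg)
--
--     for i in reversed(arg_indicies_to_pop):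
--         del args[i]
--
--     return list_to_return
-- ===== SOURCE B (Python) =====
-- def pop_command_from_list(args, cmd_list):
--     # Locate-then-slice: find the command's index, find where its args end, slice and delete.
--     cands = [(i, a) for i, a in enumerate(args) if a.startswith('-') and a.lstrip('-') in cmd_list]
--     if not cands:
--         return []
--     start, cmd_arg = cands[0]
--     stops = [j for j, a in enumerate(args) if j > start and a.startswith('-')]
--     end = stops[0] if stops else len(args)
--     result = [cmd_arg.lstrip('-')] + args[start + 1:end]
--     del args[start:end]
--     return result
-- ===== Notes on version B (the rewrite author's own statement) =====
-- stated objective: simpler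
-- what changed: B replaces A's single flag-driven accumulating pass (found_command flag, index list, reversed deletions) with a locate-then-slice decomposition: compute the first command index and the first following '-' index, then take one slice for the result and one del for the mutation.
import Mathlib
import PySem

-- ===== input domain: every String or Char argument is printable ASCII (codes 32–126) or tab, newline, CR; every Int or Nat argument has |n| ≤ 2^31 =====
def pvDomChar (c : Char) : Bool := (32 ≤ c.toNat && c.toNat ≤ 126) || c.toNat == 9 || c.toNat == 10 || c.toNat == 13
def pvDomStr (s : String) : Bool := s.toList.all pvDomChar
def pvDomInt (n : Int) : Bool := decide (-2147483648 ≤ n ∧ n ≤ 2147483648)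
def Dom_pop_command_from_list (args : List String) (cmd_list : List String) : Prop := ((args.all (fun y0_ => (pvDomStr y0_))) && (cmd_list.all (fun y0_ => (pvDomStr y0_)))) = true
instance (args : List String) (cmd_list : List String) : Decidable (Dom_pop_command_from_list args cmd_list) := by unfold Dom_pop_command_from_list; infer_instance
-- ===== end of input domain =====

-- B replaces A's flag-driven accumulating pass by a locate-then-slice decomposition (simpler);
-- both Pythons perform the same in-place deletion from args, and the theorems are about the RETURN value.

-- ===== PORT A =====

-- hand port of Python's s.lstrip('-'): drop the leading '-' characters (exact on all strings)
def pyLstripDash (s : String) : String := String.ofList (s.toList.dropWhile (fun c => c == '-'))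

-- the for-loop of A: state = (arg_indicies_to_pop, list_to_return, found_command); 'break' = return ret
def popA_loop (cmd_list : List String) : List (Int × String) → List Int → List String → Bool → List String
  | [], _, ret, _ => ret
  | (i, arg) :: rest, idxs, ret, found =>
    if PySem.Str.startswith arg "-" then
      if found then ret
      else
        let command := pyLstripDash arg
        if cmd_list.contains command then
          popA_loop cmd_list rest (idxs ++ [i]) (ret ++ [command]) true
        else
          popA_loop cmd_list rest idxs ret found
    else if found then
      popA_loop cmd_list rest (idxs ++ [i]) (ret ++ [arg]) found
    else
      popA_loop cmd_list rest idxs ret found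

-- the trailing 'for i in reversed(...): del args[i]' mutates args only; the return value is list_to_return
def pop_command_from_list (args : List String) (cmd_list : List String) : List String :=
  popA_loop cmd_list (PySem.List.enumerate args 0) [] [] false

-- ===== PORT B =====
def pop_command_from_list_alt (args : List String) (cmd_list : List String) : List String :=
  let cands := (PySem.List.enumerate args 0).filter
    (fun p => PySem.Str.startswith p.2 "-" && cmd_list.contains (pyLstripDash p.2))
  match cands with
  | [] => []
  | (start, cmd_arg) :: _ =>
    let stops := ((PySem.List.enumerate args 0).filter
      (fun p => decide (start < p.1) && PySem.Str.startswith p.2 "-")).map (·.1)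
    let e := stops.headD (args.length : Int)
    pyLstripDash cmd_arg :: PySem.List.slice args (some (start + 1)) (some e)
    -- 'del args[start:end]' mutates args only

-- ===== PRECONDITION & SPEC =====
def Spec_pop_command_from_list (args : List String) (cmd_list : List String) (out : List String) : Prop := out = pop_command_from_list_alt args cmd_list
instance (args : List String) (cmd_list : List String) (out : List String) : Decidable (Spec_pop_command_from_list args cmd_list out) := by unfold Spec_pop_command_from_list; infer_instance

-- ===== CLAIM (what is proved, stated in full; the proofs are below) =====
def Claim_equal_pop_command_from_list : Prop := ∀ (args : List String) (cmd_list : List String), Dom_pop_command_from_list args cmd_list → Spec_pop_command_from_list args cmd_list (pop_command_from_list args cmd_list)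

-- ===== LEMMAS AND PROOFS =====

-- A's loop once found_command is True: it collects args until the next '-' arg (a takeWhile)
theorem popA_loop_found (cmd_list : List String) :
    ∀ (l : List String) (s : Int) (idxs : List Int) (ret : List String),
    popA_loop cmd_list (PySem.List.enumerate l s) idxs ret true
      = ret ++ l.takeWhile (fun b => !PySem.Str.startswith b "-") := by
  intro l
  induction l with
  | nil => intro s idxs ret; simp [PySem.List.enumerate_nil, popA_loop]
  | cons a t ih =>
    intro s idxs ret
    rw [PySem.List.enumerate_cons]
    by_cases hP : PySem.Chars.startswith a.toList ['-']
    · simp [popA_loop, hP, List.takeWhile_cons]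
    · simp only [popA_loop, PySem.Str.startswith_eq, hP, Bool.false_eq_true, ↓reduceIte,
        List.takeWhile_cons, Bool.not_false, if_pos]
      rw [ih]
      simp [hP]

-- A's loop before the command is found: it skips until the first recognised '-' command
theorem popA_loop_notfound (cmd_list : List String) :
    ∀ (l : List String) (s : Int) (idxs : List Int),
    popA_loop cmd_list (PySem.List.enumerate l s) idxs [] false
      = match l.dropWhile (fun x => !(PySem.Str.startswith x "-" && cmd_list.contains (pyLstripDash x))) with
        | [] => []
        | a :: rest => pyLstripDash a :: rest.takeWhile (fun b => !PySem.Str.startswith b "-") := by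
  intro l
  induction l with
  | nil => intro s idxs; simp [PySem.List.enumerate_nil, popA_loop]
  | cons a t ih =>
    intro s idxs
    rw [PySem.List.enumerate_cons]
    by_cases hP : PySem.Chars.startswith a.toList ['-']
    · by_cases hC : cmd_list.contains (pyLstripDash a) = true
      · simp only [popA_loop, PySem.Str.startswith_eq, hP, hC, ↓reduceIte, List.dropWhile_cons,
          Bool.not_true, Bool.and_self]
        rw [popA_loop_found]
        simp [hP]
      · simp only [popA_loop, PySem.Str.startswith_eq, hP, hC, ↓reduceIte, Bool.false_eq_true,
          List.dropWhile_cons]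
        rw [ih]
        simp [hP, hC]
    · simp only [popA_loop, PySem.Str.startswith_eq, hP, Bool.false_eq_true, ↓reduceIte,
        List.dropWhile_cons]
      rw [ih]
      simp [hP]

-- a filtered enumerate is empty iff no element satisfies the predicate (dropWhile form, empty case)
theorem filter_enum_nil (R : String → Bool) :
    ∀ (l : List String) (s : Int),
    l.dropWhile (fun x => !R x) = [] →
    (PySem.List.enumerate l s).filter (fun p => R p.2) = [] := by
  intro l
  induction l with
  | nil => intro s _; simp [PySem.List.enumerate_nil]
  | cons a t ih =>
    intro s h
    by_cases hR : R a = true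
    · simp [List.dropWhile_cons, hR] at h
    · rw [List.dropWhile_cons] at h
      simp only [hR, Bool.not_false, if_pos] at h
      rw [PySem.List.enumerate_cons]
      simp only [List.filter_cons, hR]
      simpa using ih (s + 1) h

-- the head of a filtered enumerate: index = offset + length of the unmatched prefix
theorem filter_enum_head (R : String → Bool) :
    ∀ (l : List String) (s : Int) (a : String) (rest : List String),
    l.dropWhile (fun x => !R x) = a :: rest →
    ((PySem.List.enumerate l s).filter (fun p => R p.2)).head?
      = some (s + ((l.takeWhile (fun x => !R x)).length : Int), a) := by
  intro l
  induction l with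
  | nil => intro s a rest h; simp at h
  | cons b t ih =>
    intro s a rest h
    rw [PySem.List.enumerate_cons]
    by_cases hR : R b
    · rw [List.dropWhile_cons] at h
      simp only [hR, Bool.not_true, Bool.false_eq_true, ↓reduceIte, List.cons.injEq] at h
      obtain ⟨rfl, rfl⟩ := h
      simp [List.filter_cons, hR, List.takeWhile_cons]
    · rw [List.dropWhile_cons] at h
      simp only [hR, Bool.not_false, if_pos] at h
      simp only [List.filter_cons, hR, Bool.false_eq_true, ↓reduceIte]
      rw [ih (s + 1) a rest h]
      simp [List.takeWhile_cons, hR]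
      push_cast
      ring_nf

-- ===== VERDICT (by name: the statement is the Claim_ definition above) =====
theorem pop_command_from_list_spec : Claim_equal_pop_command_from_list := by
  intro args cmd_list _
  unfold Spec_pop_command_from_list pop_command_from_list pop_command_from_list_alt
  rw [popA_loop_notfound]
  cases hd : args.dropWhile (fun x => !(PySem.Str.startswith x "-" && cmd_list.contains (pyLstripDash x))) with
  | nil =>
    have hc := filter_enum_nil (fun x => PySem.Str.startswith x "-" && cmd_list.contains (pyLstripDash x)) args 0 hd
    simp only [] at hc
    simp only [hc]
  | cons a rest =>
    have hhead := filter_enum_head (fun x => PySem.Str.startswith x "-" && cmd_list.contains (pyLstripDash x)) args 0 a rest hd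
    simp only [] at hhead
    -- name the length of the skipped prefix
    set n : Nat := (args.takeWhile (fun x => !(PySem.Str.startswith x "-" && cmd_list.contains (pyLstripDash x)))).length with hn
    -- the candidate list is nonempty, with head ((0 : Int) + n, a)
    cases hcs : (PySem.List.enumerate args 0).filter
        (fun p => PySem.Str.startswith p.2 "-" && cmd_list.contains (pyLstripDash p.2)) with
    | nil => rw [hcs] at hhead; simp at hhead
    | cons c tl =>
      rw [hcs] at hhead
      simp only [List.head?_cons, Option.some.injEq] at hhead
      subst hhead
      -- decompose args around the found command
      have hsplit : args = (args.takeWhile (fun x => !(PySem.Str.startswith x "-" && cmd_list.contains (pyLstripDash x)))) ++ a :: rest := by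
        conv_lhs => rw [← List.takeWhile_append_dropWhile
          (p := fun x => !(PySem.Str.startswith x "-" && cmd_list.contains (pyLstripDash x))) (l := args)]
        rw [hd]
      have hdrop : args.drop (n + 1) = rest := by
        conv_lhs => rw [hsplit]
        rw [show (args.takeWhile (fun x => !(PySem.Str.startswith x "-" && cmd_list.contains (pyLstripDash x)))) ++ a :: rest
              = ((args.takeWhile (fun x => !(PySem.Str.startswith x "-" && cmd_list.contains (pyLstripDash x)))) ++ [a]) ++ rest by simp]
        rw [List.drop_left' (by
          rw [List.length_append, ← hn]
          simp)]
      have hlen : args.length = n + 1 + rest.length := by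
        rw [hsplit, List.length_append, List.length_cons, ← hn]; omega
      -- characterise the 'stops' list: only indices past the command, where the tail starts with '-'
      have hstops :
          ((PySem.List.enumerate args 0).filter
            (fun p => decide ((0 : Int) + (n : Int) < p.1) && PySem.Str.startswith p.2 "-")).map (fun x => x.1)
          = ((PySem.List.enumerate rest ((0 : Int) + (n : Int) + 1)).filter
            (fun p => PySem.Str.startswith p.2 "-")).map (fun x => x.1) := by
        conv_lhs => rw [hsplit, PySem.List.enumerate_append]
        rw [List.filter_append, ← hn, PySem.List.enumerate_cons, List.filter_cons]
        have h1 : (PySem.List.enumerate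
            (args.takeWhile (fun x => !(PySem.Str.startswith x "-" && cmd_list.contains (pyLstripDash x)))) 0).filter
            (fun p => decide ((0 : Int) + (n : Int) < p.1) && PySem.Str.startswith p.2 "-") = [] := by
          apply List.filter_eq_nil_iff.mpr
          intro p hp
          rw [PySem.List.mem_enumerate_iff] at hp
          obtain ⟨k, hk, rfl⟩ := hp
          rw [← hn] at hk
          simp
          exact fun h => absurd h (by omega)

        have h3 : (PySem.List.enumerate rest ((0 : Int) + (n : Int) + 1)).filter
            (fun p => decide ((0 : Int) + (n : Int) < p.1) && PySem.Str.startswith p.2 "-")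
            = (PySem.List.enumerate rest ((0 : Int) + (n : Int) + 1)).filter
            (fun p => PySem.Str.startswith p.2 "-") := by
          apply List.filter_congr
          intro p hp
          rw [PySem.List.mem_enumerate_iff] at hp
          obtain ⟨k, hk, rfl⟩ := hp
          simp
          intro _
          omega
        rw [h1]
        simp only [List.nil_append]
        rw [show (decide ((0 : Int) + (n : Int) < (((0 : Int) + (n : Int), a)).1)
              && PySem.Str.startswith (((0 : Int) + (n : Int), a)).2 "-") = false from by simp]
        simp only [Bool.false_eq_true, ↓reduceIte]
        rw [h3]
      simp only [hcs]
      cases he : rest.dropWhile (fun b => !PySem.Str.startswith b "-") with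
      | nil =>
        have h0 := filter_enum_nil (fun b => PySem.Str.startswith b "-") rest ((0 : Int) + (n : Int) + 1)
          (by simpa using he)
        simp only [] at h0
        have htw : rest.takeWhile (fun b => !PySem.Str.startswith b "-") = rest := by
          conv_rhs => rw [← List.takeWhile_append_dropWhile
            (p := fun b => !PySem.Str.startswith b "-") (l := rest), he]
          rw [List.append_nil]
        have hslice : PySem.List.slice args (some ((0 : Int) + (n : Int) + 1)) (some (args.length : Int)) = rest := by
          have e1 : (0 : Int) + (n : Int) + 1 = ((n + 1 : Nat) : Int) := by omega
          rw [e1, PySem.List.slice_natCast, hdrop, hlen]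
          simp
        rw [hstops, h0]
        simp only [List.map_nil, List.headD_nil]
        rw [hslice, htw]
      | cons b rest2 =>
        have hh := filter_enum_head (fun b => PySem.Str.startswith b "-") rest ((0 : Int) + (n : Int) + 1) b rest2
          (by simpa using he)
        simp only [] at hh
        rw [hstops]
        cases hfs : (PySem.List.enumerate rest ((0 : Int) + (n : Int) + 1)).filter
            (fun p => PySem.Str.startswith p.2 "-") with
        | nil => rw [hfs] at hh; simp at hh
        | cons c2 tl2 =>
          rw [hfs] at hh
          simp only [List.head?_cons, Option.some.injEq] at hh
          subst hh
          simp only [List.map_cons, List.headD_cons]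
          have hm : rest.takeWhile (fun b => !PySem.Str.startswith b "-")
              = rest.take ((rest.takeWhile (fun x => !PySem.Str.startswith x "-")).length) :=
            List.prefix_iff_eq_take.mp (List.takeWhile_prefix _)
          have hslice : PySem.List.slice args (some ((0 : Int) + (n : Int) + 1))
              (some ((0 : Int) + (n : Int) + 1 + ((rest.takeWhile (fun x => !PySem.Str.startswith x "-")).length : Int)))
              = rest.take ((rest.takeWhile (fun x => !PySem.Str.startswith x "-")).length) := by
            have e1 : (0 : Int) + (n : Int) + 1 = ((n + 1 : Nat) : Int) := by omega
            rw [e1, PySem.List.slice_natCast_add, hdrop]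
          rw [hslice, ← hm]
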